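-- pv_equiv track=rewrite | github.com/TTCashier/aus-name-checker | name_checker/names.py | _portmanteau
-- ===== SOURCE A (Python) =====
-- def _portmanteau(word1: str, word2: str) -> list[str]:
--     """Generate portmanteau blends of two words.
--     Finds overlap points (shared letters at join) and merges,
--     plus simple truncation blends."""
--     results = []
--     w1 = word1.lower()
--     w2 = word2.lower()
--
--     # Overlap blending: find where end of word1 overlaps with start of word2
--     for overlap_len in range(1, min(len(w1), len(w2))):
--         if w1[-overlap_len:] == w2[:overlap_len]:
--             blend = word1 + word2[overlap_len:]
--             results.append(blend)
--
--     # Simple truncation blends: first 3-4 chars of w1 + last 3-4 chars of w2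
--     for cut1 in range(3, min(5, len(w1) + 1)):
--         for cut2 in range(3, min(5, len(w2) + 1)):
--             blend = word1[:cut1] + word2[-cut2:]
--             # Capitalize second part
--             blend_cap = word1[:cut1].capitalize() + word2[-cut2:]
--             if blend_cap.lower() != w1 and blend_cap.lower() != w2:
--                 results.append(blend_cap)
--
--     # Deduplicate while preserving order
--     seen = set()
--     unique = []
--     for r in results:
--         if r.lower() not in seen:
--             seen.add(r.lower())
--             unique.append(r)
--     return unique[:6]  # Cap to avoid too many
-- ===== SOURCE B (Python) =====
-- def _z_array(s):
--     """Z-array: z[i] = length of the longest common prefix of s and s[i:]."""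
--     n = len(s)
--     z = [0] * n
--     l = r = 0
--     for i in range(1, n):
--         k = min(r - i, z[i - l]) if i < r else 0
--         while i + k < n and s[k] == s[i + k]:
--             k += 1
--         z[i] = k
--         if i + k > r:
--             l, r = i, i + k
--     return z
--
--
-- def _portmanteau(word1: str, word2: str) -> list[str]:
--     """All suffix(w1)-prefix(w2) overlap lengths are read off one Z-array of
--     w2+w1 computed in O(n) (the suffix of length k overlaps iff z[m-k] == k),
--     instead of comparing a pair of fresh slices per overlap length; dedup keeps
--     the first spelling per lowercase form via a dict."""
--     w1 = word1.lower()
--     w2 = word2.lower()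
--     n1, n2 = len(w1), len(w2)
--     z = _z_array(w2 + w1)
--     m = n1 + n2
--     results = []
--     for k in range(1, min(n1, n2)):
--         if z[m - k] == k:
--             results.append(word1 + word2[k:])
--     for cut1 in range(3, min(5, n1 + 1)):
--         head = word1[:cut1].capitalize()
--         for cut2 in range(3, min(5, n2 + 1)):
--             blend = head + word2[-cut2:]
--             low = blend.lower()
--             if low != w1 and low != w2:
--                 results.append(blend)
--     uniq = {}
--     for r_ in results:
--         uniq.setdefault(r_.lower(), r_)
--     return list(uniq.values())[:6]
-- ===== Notes on version B (the rewrite author's own statement) =====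
-- stated objective: faster
-- what changed: overlap lengths are read off a single Z-array of w2+w1 (Z-algorithm, computed once in linear time) instead of comparing two freshly built slices for every candidate overlap length, and dedup keeps the first spelling per lowercase form via one dict.setdefault pass instead of a parallel set+list
import Mathlib
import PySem

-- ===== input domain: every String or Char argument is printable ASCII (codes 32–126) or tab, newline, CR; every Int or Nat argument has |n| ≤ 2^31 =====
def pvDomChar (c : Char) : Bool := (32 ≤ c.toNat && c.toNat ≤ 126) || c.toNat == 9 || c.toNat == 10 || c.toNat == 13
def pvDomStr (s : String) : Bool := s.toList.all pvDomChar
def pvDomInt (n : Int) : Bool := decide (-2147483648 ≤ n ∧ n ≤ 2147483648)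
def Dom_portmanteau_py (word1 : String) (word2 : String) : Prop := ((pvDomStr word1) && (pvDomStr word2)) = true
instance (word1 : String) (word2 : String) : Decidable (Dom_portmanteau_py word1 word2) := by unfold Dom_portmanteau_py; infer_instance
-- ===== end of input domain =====

-- B finds every suffix(w1)/prefix(w2) overlap by reading one Z-array of w2+w1 (computed once,
-- linear-time) instead of comparing a pair of fresh slices per overlap length, and dedups with a
-- dict keyed by the lowercase form; intended to be faster on long words.


-- ===== PORT A =====

-- str.capitalize(): first char uppercased, rest lowercased (exact on ASCII; shared by both ports)
def pvCapitalize (cs : List Char) : List Char :=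
  match cs with
  | [] => []
  | c :: rest => PySem.Chars.upperChar c :: PySem.Chars.lower rest

-- blend_cap = word1[:cut1].capitalize() + word2[-cut2:]
def pvBlendCap (word1L word2L : List Char) (cut1 cut2 : Int) : List Char :=
  pvCapitalize (PySem.List.slice word1L none (some cut1)) ++
    PySem.List.slice word2L (some (-cut2)) none

-- body of A's dedup loop: 'if r.lower() not in seen: seen.add(r.lower()); unique.append(r)'
def pvDedupStep (su : PySem.Set (List Char) × List (List Char)) (r : List Char) :
    PySem.Set (List Char) × List (List Char) :=
  if PySem.Set.contains su.1 (PySem.Chars.lower r) then su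
  else (PySem.Set.add su.1 (PySem.Chars.lower r), su.2 ++ [r])

def portmanteau_py (word1 : String) (word2 : String) : List String :=
  let word1L := word1.toList
  let word2L := word2.toList
  let w1 := PySem.Chars.lower word1L
  let w2 := PySem.Chars.lower word2L
  -- overlap blending
  let results : List (List Char) :=
    (PySem.List.pyRange 1 (min (PySem.List.len w1) (PySem.List.len w2)) 1).foldl
      (fun acc k =>
        if PySem.List.slice w1 (some (-k)) none = PySem.List.slice w2 none (some k) then
          acc ++ [word1L ++ PySem.List.slice word2L (some k) none]
        else acc) []
  -- simple truncation blends
  let results :=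
    (PySem.List.pyRange 3 (min 5 (PySem.List.len w1 + 1)) 1).foldl
      (fun acc cut1 =>
        (PySem.List.pyRange 3 (min 5 (PySem.List.len w2 + 1)) 1).foldl
          (fun acc2 cut2 =>
            if PySem.Chars.lower (pvBlendCap word1L word2L cut1 cut2) ≠ w1 ∧
               PySem.Chars.lower (pvBlendCap word1L word2L cut1 cut2) ≠ w2 then
              acc2 ++ [pvBlendCap word1L word2L cut1 cut2]
            else acc2) acc) results
  -- deduplicate while preserving order, then unique[:6]
  let su := results.foldl pvDedupStep (PySem.Set.empty, [])
  (PySem.List.slice su.2 none (some 6)).map String.ofList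

-- ===== PORT B =====

-- the Z-algorithm's inner 'while i + k < n and s[k] == s[i + k]: k += 1' loop
-- (both indices are in range while the guard holds, so List.getD is exact)
def pvZExtend (s : List Char) (i : Nat) (k : Nat) : Nat :=
  if h : i + k < s.length ∧ s.getD k ' ' = s.getD (i + k) ' ' then pvZExtend s i (k + 1)
  else k
termination_by s.length - (i + k)
decreasing_by obtain ⟨h1, -⟩ := h; omega

-- one iteration of the Z-algorithm's for-loop; state = (z, l, r).  Python's z[i - l] and
-- z[i] = k always hit indices in range (l ≤ i < len(z)), so getD/set are exact; all the
-- Python ints involved are non-negative, so Nat transliterates range(1, n) and min(r-i, ...)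
def pvZStep (s : List Char) (st : List Nat × Nat × Nat) (i : Nat) : List Nat × Nat × Nat :=
  let k0 := if i < st.2.2 then min (st.2.2 - i) (st.1.getD (i - st.2.1) 0) else 0
  let k := pvZExtend s i k0
  let z' := st.1.set i k
  if st.2.2 < i + k then (z', i, i + k) else (z', st.2.1, st.2.2)

-- _z_array(s): z = [0]*n; l = r = 0; for i in range(1, n): ...  (returns z)
def pvZArray (s : List Char) : List Nat :=
  ((List.range' 1 (s.length - 1)).foldl (pvZStep s) (List.replicate s.length 0, 0, 0)).1

def portmanteau_py_alt (word1 : String) (word2 : String) : List String :=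
  let word1L := word1.toList
  let word2L := word2.toList
  let w1 := PySem.Chars.lower word1L
  let w2 := PySem.Chars.lower word2L
  let n1 := w1.length
  let n2 := w2.length
  let z := pvZArray (w2 ++ w1)
  -- suffix of w1 of length k == prefix of w2 of length k  <=>  z[m - k] == k
  let results : List (List Char) :=
    (PySem.List.pyRange 1 (min (n1 : Int) (n2 : Int)) 1).foldl
      (fun acc k =>
        if z.getD (n1 + n2 - k.toNat) 0 = k.toNat then
          acc ++ [word1L ++ PySem.List.slice word2L (some k) none]
        else acc) []
  let results :=
    (PySem.List.pyRange 3 (min 5 ((n1 : Int) + 1)) 1).foldl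
      (fun acc cut1 =>
        let head := pvCapitalize (PySem.List.slice word1L none (some cut1))
        (PySem.List.pyRange 3 (min 5 ((n2 : Int) + 1)) 1).foldl
          (fun acc2 cut2 =>
            let blend := head ++ PySem.List.slice word2L (some (-cut2)) none
            if PySem.Chars.lower blend ≠ w1 ∧ PySem.Chars.lower blend ≠ w2 then
              acc2 ++ [blend]
            else acc2) acc) results
  -- uniq.setdefault(r.lower(), r); list(uniq.values())[:6]
  let uniq := results.foldl
    (fun d r => PySem.Dict.setdefault d (PySem.Chars.lower r) r)
    PySem.Dict.empty
  (PySem.List.slice (PySem.Dict.values uniq) none (some 6)).map String.ofList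

-- ===== PRECONDITION & SPEC =====
def Spec_portmanteau_py (word1 : String) (word2 : String) (out : List String) : Prop := out = portmanteau_py_alt word1 word2
instance (word1 : String) (word2 : String) (out : List String) : Decidable (Spec_portmanteau_py word1 word2 out) := by unfold Spec_portmanteau_py; infer_instance

-- ===== CLAIM (what is proved, stated in full; the proofs are below) =====
def Claim_equal_portmanteau_py : Prop := ∀ (word1 : String) (word2 : String), Dom_portmanteau_py word1 word2 → Spec_portmanteau_py word1 word2 (portmanteau_py word1 word2)

-- ===== LEMMAS AND PROOFS =====

-- longest common prefix length of two lists (the value the Z-array holds, per suffix)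
def pvLcp : List Char → List Char → Nat
  | a :: as, b :: bs => if a = b then pvLcp as bs + 1 else 0
  | _, _ => 0

theorem pvLcp_le_right (a b : List Char) : pvLcp a b ≤ b.length := by
  induction a generalizing b with
  | nil => simp [pvLcp]
  | cons x as ih =>
    cases b with
    | nil => simp [pvLcp]
    | cons y bs =>
      simp only [pvLcp, List.length_cons]
      split_ifs with h
      · exact Nat.succ_le_succ (ih bs)
      · omega

-- characters below the lcp agree
theorem pvLcp_agree (a b : List Char) : ∀ p, p < pvLcp a b → a.getD p ' ' = b.getD p ' ' := by
  induction a generalizing b with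
  | nil => simp [pvLcp]
  | cons x as ih =>
    cases b with
    | nil => simp [pvLcp]
    | cons y bs =>
      intro p hp
      simp only [pvLcp] at hp
      split_ifs at hp with h
      · cases p with
        | zero => simpa using h
        | succ q => simpa [List.getD_cons_succ] using ih bs q (by omega)
      · omega

-- lower bound: agreement on the first k positions forces k ≤ lcp
theorem pvLcp_ge (a b : List Char) (k : Nat) (ha : k ≤ a.length) (hb : k ≤ b.length)
    (hag : ∀ p, p < k → a.getD p ' ' = b.getD p ' ') : k ≤ pvLcp a b := by
  induction a generalizing b k with
  | nil =>
    have hk0 : k = 0 := by simpa using ha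
    subst hk0; exact Nat.zero_le _
  | cons x as ih =>
    cases b with
    | nil =>
      have hk0 : k = 0 := by simpa using hb
      subst hk0; exact Nat.zero_le _
    | cons y bs =>
      cases k with
      | zero => omega
      | succ m =>
        have hxy : x = y := by simpa using hag 0 (by omega)
        simp only [pvLcp, if_pos hxy]
        have : m ≤ pvLcp as bs := by
          apply ih bs m (by simpa using ha) (by simpa using hb)
          intro p hp
          simpa [List.getD_cons_succ] using hag (p + 1) (by omega)
        omega

-- upper bound: a mismatch at position k caps the lcp at k
theorem pvLcp_lt (a b : List Char) (k : Nat) (ha : k < a.length) (hb : k < b.length)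
    (hne : a.getD k ' ' ≠ b.getD k ' ') : pvLcp a b ≤ k := by
  induction a generalizing b k with
  | nil => simp [pvLcp]
  | cons x as ih =>
    cases b with
    | nil => simp [pvLcp]
    | cons y bs =>
      cases k with
      | zero =>
        have hxy : x ≠ y := by simpa using hne
        simp [pvLcp, hxy]
      | succ m =>
        simp only [pvLcp]
        split_ifs with h
        · have : pvLcp as bs ≤ m := by
            apply ih bs m (by simpa using ha) (by simpa using hb)
            simpa [List.getD_cons_succ] using hne
          omega
        · omega

-- lcp reaches the whole of b exactly when b is a prefix of a
theorem pvLcp_eq_length_iff (a b : List Char) (hlen : b.length ≤ a.length) :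
    pvLcp a b = b.length ↔ b = a.take b.length := by
  induction b generalizing a with
  | nil => simp [pvLcp]
  | cons y bs ih =>
    cases a with
    | nil => simp at hlen
    | cons x as =>
      simp only [pvLcp, List.length_cons, List.take_succ_cons, List.cons_eq_cons]
      split_ifs with h
      · rw [Nat.succ_inj]
        constructor
        · intro he; exact ⟨h.symm, (ih as (by simpa using hlen)).mp he⟩
        · intro ⟨_, he⟩; exact (ih as (by simpa using hlen)).mpr he
      · constructor
        · intro he; simp at he
        · intro ⟨hyx, _⟩; exact absurd hyx.symm h

-- (s.drop i)[p] is s[i+p]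
theorem pvGetD_drop (s : List Char) (i p : Nat) :
    (s.drop i).getD p ' ' = s.getD (i + p) ' ' := by
  simp [List.getD, List.getElem?_drop]

theorem pvGetD_set_self (z : List Nat) (i v : Nat) (h : i < z.length) :
    (z.set i v).getD i 0 = v := by
  simp [List.getD, h]

theorem pvGetD_set_ne (z : List Nat) (i j v : Nat) (h : j ≠ i) :
    (z.set i v).getD j 0 = z.getD j 0 := by
  simp [List.getD, (Ne.symm h : ¬ i = j)]

-- the while loop extends a sound starting point to exactly the lcp with the suffix at i
theorem pvZExtend_eq_lcp (s : List Char) (i : Nat) (k : Nat) (hik : i + k ≤ s.length)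
    (hag : ∀ p, p < k → s.getD p ' ' = s.getD (i + p) ' ') :
    pvZExtend s i k = pvLcp s (s.drop i) := by
  rw [pvZExtend]
  split
  case isTrue h =>
    refine pvZExtend_eq_lcp s i (k + 1) (by omega) ?_
    intro p hp
    by_cases hpk : p < k
    · exact hag p hpk
    · have : p = k := by omega
      subst this
      exact h.2
  case isFalse h =>
    have hge : k ≤ pvLcp s (s.drop i) := by
      apply pvLcp_ge s (s.drop i) k (by omega) (by simp; omega)
      intro p hp
      rw [pvGetD_drop]
      exact hag p hp
    by_cases hn : i + k < s.length
    · have hne : s.getD k ' ' ≠ s.getD (i + k) ' ' := fun hc => h ⟨hn, hc⟩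
      have hle : pvLcp s (s.drop i) ≤ k := by
        apply pvLcp_lt s (s.drop i) k (by omega) (by simp; omega)
        rw [pvGetD_drop]
        exact hne
      omega
    · have hle : pvLcp s (s.drop i) ≤ k := by
        have := pvLcp_le_right s (s.drop i)
        simp at this
        omega
      omega
termination_by s.length - (i + k)
decreasing_by omega

-- the Z-algorithm loop invariant
def pvZInv (s : List Char) (i : Nat) (st : List Nat × Nat × Nat) : Prop :=
  st.1.length = s.length ∧
  (∀ j, 1 ≤ j → j < i → st.1.getD j 0 = pvLcp s (s.drop j)) ∧
  st.2.2 ≤ s.length ∧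
  (0 < st.2.2 →
    1 ≤ st.2.1 ∧ st.2.1 < i ∧ st.2.1 ≤ st.2.2 ∧
    (∀ q, q < st.2.2 - st.2.1 → s.getD q ' ' = s.getD (st.2.1 + q) ' '))

theorem pvZStep_inv (s : List Char) (i : Nat) (st : List Nat × Nat × Nat)
    (hi : 1 ≤ i) (hin : i < s.length) (hinv : pvZInv s i st) :
    pvZInv s (i + 1) (pvZStep s st i) := by
  obtain ⟨z, l, r⟩ := st
  obtain ⟨hlen, hz, hr, hbox⟩ := hinv
  simp only at hlen hz hr hbox
  -- the starting point fed to the while loop is sound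
  have hsound : i + (if i < r then min (r - i) (z.getD (i - l) 0) else 0) ≤ s.length ∧
      ∀ p, p < (if i < r then min (r - i) (z.getD (i - l) 0) else 0) →
        s.getD p ' ' = s.getD (i + p) ' ' := by
    split_ifs with hir
    · obtain ⟨hl1, hli, hlr, hq⟩ := hbox (by omega)
      have hzj : z.getD (i - l) 0 = pvLcp s (s.drop (i - l)) := hz (i - l) (by omega) (by omega)
      refine ⟨by omega, ?_⟩
      intro p hp
      have hp1 : p < r - i := lt_of_lt_of_le hp (min_le_left _ _)
      have hp2 : p < pvLcp s (s.drop (i - l)) := by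
        have := lt_of_lt_of_le hp (min_le_right _ _); omega
      have e1 : s.getD p ' ' = s.getD ((i - l) + p) ' ' := by
        have := pvLcp_agree s (s.drop (i - l)) p hp2
        rwa [pvGetD_drop] at this
      have e2 : s.getD ((i - l) + p) ' ' = s.getD (l + ((i - l) + p)) ' ' :=
        hq _ (by omega)
      have e3 : l + ((i - l) + p) = i + p := by omega
      rw [e1, e2, e3]
    · exact ⟨by omega, fun p hp => absurd hp (by omega)⟩
  have hk : pvZExtend s i (if i < r then min (r - i) (z.getD (i - l) 0) else 0)
      = pvLcp s (s.drop i) := pvZExtend_eq_lcp s i _ hsound.1 hsound.2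
  have hKle : pvLcp s (s.drop i) ≤ s.length - i := by
    have := pvLcp_le_right s (s.drop i)
    simpa using this
  have hKag : ∀ q, q < pvLcp s (s.drop i) → s.getD q ' ' = s.getD (i + q) ' ' := by
    intro q hq
    have := pvLcp_agree s (s.drop i) q hq
    rwa [pvGetD_drop] at this
  have hzlen : (z.set i (pvLcp s (s.drop i))).length = s.length := by
    simpa using hlen
  have hznew : ∀ j, 1 ≤ j → j < i + 1 →
      (z.set i (pvLcp s (s.drop i))).getD j 0 = pvLcp s (s.drop j) := by
    intro j hj1 hj2
    by_cases hji : j = i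
    · subst hji
      exact pvGetD_set_self z j _ (by omega)
    · rw [pvGetD_set_ne z i j _ hji]
      exact hz j hj1 (by omega)
  simp only [pvZStep, hk]
  split_ifs with hupd
  · dsimp only [pvZInv]
    exact ⟨hzlen, hznew, by omega, fun _ => ⟨hi, by omega, by omega,
      fun q hq => hKag q (by omega)⟩⟩
  · dsimp only [pvZInv]
    refine ⟨hzlen, hznew, hr, ?_⟩
    intro hrpos
    obtain ⟨hl1, hli, hlr, hq⟩ := hbox hrpos
    exact ⟨hl1, by omega, hlr, hq⟩

theorem pvZArray_getD (s : List Char) (j : Nat) (h1 : 1 ≤ j) (h2 : j < s.length) :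
    (pvZArray s).getD j 0 = pvLcp s (s.drop j) := by
  have main : ∀ m, m ≤ s.length - 1 →
      pvZInv s (1 + m)
        ((List.range' 1 m).foldl (pvZStep s) (List.replicate s.length 0, 0, 0)) := by
    intro m
    induction m with
    | zero =>
      intro _
      simp only [List.range'_zero, List.foldl_nil]
      dsimp only [pvZInv]
      exact ⟨by simp, fun j hj1 hj2 => absurd hj2 (by omega), by omega,
        fun h => absurd h (by omega)⟩
    | succ m ih =>
      intro hm
      have hrc : List.range' 1 (m + 1) = List.range' 1 m ++ [1 + m] := by
        rw [List.range'_concat]; simp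
      rw [hrc, List.foldl_append, List.foldl_cons, List.foldl_nil]
      have hstep := pvZStep_inv s (1 + m) _ (by omega) (by omega) (ih (by omega))
      have e : 1 + (m + 1) = (1 + m) + 1 := by omega
      rw [e]
      exact hstep
  have hfin := main (s.length - 1) (le_refl _)
  have e : 1 + (s.length - 1) = s.length := by omega
  rw [e] at hfin
  unfold pvZArray
  exact hfin.2.1 j h1 h2

-- the two overlap tests agree for every overlap length the loop visits
theorem pvOvCond (w1 w2 : List Char) (k : Int)
    (h1 : 1 ≤ k) (h2 : k < min (w1.length : Int) (w2.length : Int)) :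
    ((pvZArray (w2 ++ w1)).getD (w1.length + w2.length - k.toNat) 0 = k.toNat ↔
      PySem.List.slice w1 (some (-k)) none = PySem.List.slice w2 none (some k)) := by
  obtain ⟨k', rfl⟩ : ∃ k' : Nat, k = (k' : Int) :=
    ⟨k.toNat, (Int.toNat_of_nonneg (by omega)).symm⟩
  obtain ⟨h2a, h2b⟩ := lt_min_iff.mp h2
  have hk1 : 1 ≤ k' := by exact_mod_cast h1
  have hkn1 : k' < w1.length := by exact_mod_cast h2a
  have hkn2 : k' < w2.length := by exact_mod_cast h2b
  rw [PySem.List.slice_from_neg_natCast w1 k' (by omega), PySem.List.slice_to_natCast w2 k',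
    Int.toNat_natCast]
  have hj1 : 1 ≤ w1.length + w2.length - k' := by omega
  have hj2 : w1.length + w2.length - k' < (w2 ++ w1).length := by simp; omega
  rw [pvZArray_getD (w2 ++ w1) _ hj1 hj2]
  have hdrop : (w2 ++ w1).drop (w1.length + w2.length - k') = w1.drop (w1.length - k') := by
    have e : w1.length + w2.length - k' = w2.length + (w1.length - k') := by omega
    rw [e, List.drop_append]
    simp
  rw [hdrop]
  have hblen : (w1.drop (w1.length - k')).length = k' := by simp; omega
  have hiff := pvLcp_eq_length_iff (w2 ++ w1) (w1.drop (w1.length - k'))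
    (by simp [hblen]; omega)
  rw [hblen] at hiff
  rw [hiff, List.take_append_of_le_length (by omega)]

-- A's set+list dedup loop and B's dict-setdefault loop carry the same deduped sequence
theorem pvDedup_eq (rs : List (List Char)) (seen : PySem.Set (List Char))
    (d : PySem.Dict (List Char) (List Char)) (u : List (List Char))
    (hmem : ∀ x, x ∈ seen ↔ d.contains x = true)
    (hval : PySem.Dict.values d = u) :
    (rs.foldl pvDedupStep (seen, u)).2
      = PySem.Dict.values (rs.foldl
          (fun d r => PySem.Dict.setdefault d (PySem.Chars.lower r) r) d) := by
  induction rs generalizing seen d u with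
  | nil => simpa using hval.symm
  | cons r rs ih =>
    simp only [List.foldl_cons]
    by_cases hc : PySem.Chars.lower r ∈ seen
    · have hstep : pvDedupStep (seen, u) r = (seen, u) := by
        simp [pvDedupStep, hc]
      have hdc : d.contains (PySem.Chars.lower r) = true := (hmem _).mp hc
      rw [hstep, PySem.Dict.setdefault_of_contains (h := hdc)]
      exact ih seen d u hmem hval
    · have hdc : d.contains (PySem.Chars.lower r) = false := by
        have hx := (hmem (PySem.Chars.lower r))
        rcases hb : d.contains (PySem.Chars.lower r) with _ | _
        · rfl
        · exact absurd (hx.mpr hb) hc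
      have hstep : pvDedupStep (seen, u)  r
          = (PySem.Set.add seen (PySem.Chars.lower r), u ++ [r]) := by
        simp [pvDedupStep, hc]
      rw [hstep, PySem.Dict.setdefault_of_not_contains (h := hdc)]
      apply ih
      · intro x
        rw [PySem.Set.mem_add, PySem.Dict.contains_insert]
        constructor
        · rintro (hx | rfl)
          · simp [(hmem x).mp hx]
          · simp
        · intro hx
          rcases Bool.or_eq_true_iff.mp hx with hx | hx
          · right; simpa using hx
          · left; exact (hmem x).mpr hx
      · simp only [PySem.Dict.values] at hval ⊢
        rw [PySem.Dict.items_insert_of_not_contains (h := hdc)]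
        simp [hval]

-- the two overlap loops build the same list of overlap blends
theorem pvOvFold_eq (word1L word2L : List Char) :
    (PySem.List.pyRange 1
        (min ((PySem.Chars.lower word1L).length : Int) ((PySem.Chars.lower word2L).length : Int)) 1).foldl
      (fun acc k =>
        if PySem.List.slice (PySem.Chars.lower word1L) (some (-k)) none
            = PySem.List.slice (PySem.Chars.lower word2L) none (some k) then
          acc ++ [word1L ++ PySem.List.slice word2L (some k) none]
        else acc) []
    = (PySem.List.pyRange 1
        (min ((PySem.Chars.lower word1L).length : Int) ((PySem.Chars.lower word2L).length : Int)) 1).foldl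
      (fun acc k =>
        if (pvZArray (PySem.Chars.lower word2L ++ PySem.Chars.lower word1L)).getD
            ((PySem.Chars.lower word1L).length + (PySem.Chars.lower word2L).length - k.toNat) 0
            = k.toNat then
          acc ++ [word1L ++ PySem.List.slice word2L (some k) none]
        else acc) [] := by
  apply PySem.List.foldl_congr_mem
  intro acc k hk
  rw [PySem.List.mem_pyRange_one] at hk
  have hiff := pvOvCond (PySem.Chars.lower word1L) (PySem.Chars.lower word2L) k hk.1 hk.2
  by_cases hc : (pvZArray (PySem.Chars.lower word2L ++ PySem.Chars.lower word1L)).getD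
      ((PySem.Chars.lower word1L).length + (PySem.Chars.lower word2L).length - k.toNat) 0
      = k.toNat
  · rw [if_pos (hiff.mp hc), if_pos hc]
  · rw [if_neg (fun hs => hc (hiff.mpr hs)), if_neg hc]

-- ===== VERDICT (by name: the statement is the Claim_ definition above) =====
theorem portmanteau_py_spec : Claim_equal_portmanteau_py := by
  intro word1 word2 _
  unfold Spec_portmanteau_py
  unfold portmanteau_py portmanteau_py_alt
  simp only [PySem.List.len_eq, pvBlendCap]
  rw [pvOvFold_eq]
  exact congrArg (List.map String.ofList)
    (congrArg (fun t => PySem.List.slice t none (some 6))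
      (pvDedup_eq _ _ _ _ (by simp [PySem.Set.empty]) rfl))
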